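-- pv_equiv track=rewrite | github.com/yxliu-TAMU/Fast-Protein-Sequence-Retrieval-and-Alignment-Using-PLM | baseline.py | parse_blast_alignment
-- ===== SOURCE A (Python) =====
-- def parse_blast_alignment(aligned_ref, aligned_ali):
--     ref_ptr, ali_ptr = 0, 0
--     insert_counts = [0]
--     delete_labels = [1]  # BOS token is always marked as deleted
--
--     while ali_ptr < len(aligned_ali):
--         if aligned_ali[ali_ptr] == '-':
--             insert_counts[-1] += 1
--             ali_ptr += 1
--         else:
--             if aligned_ref[ali_ptr] == '-':
--                 delete_labels.append(1)
--             else: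
--                 delete_labels.append(0)
--                 ref_ptr += 1
--             ali_ptr += 1
--             insert_counts.append(0)
--     return insert_counts, delete_labels
-- ===== SOURCE B (Python) =====
-- def parse_blast_alignment(aligned_ref, aligned_ali):
--     # indices of non-gap positions of the alignment
--     pos = [i for i, c in enumerate(aligned_ali) if c != '-']
--     # gap run-lengths are the distances between consecutive boundaries
--     bounds = [-1] + pos + [len(aligned_ali)]
--     insert_counts = [b - a - 1 for a, b in zip(bounds, bounds[1:])]
--     delete_labels = [1] + [1 if aligned_ref[i] == '-' else 0 for i in pos]
--     return insert_counts, delete_labels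
-- ===== Notes on version B (the rewrite author's own statement) =====
-- stated objective: alternative
-- what changed: Instead of A's fused while-loop that mutates a running gap counter, B first materialises the list of non-gap positions and then derives insert_counts as pairwise differences of consecutive boundary indices (zip of the boundary list with its shift) and delete_labels by positional lookups at those indices.
import Mathlib
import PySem

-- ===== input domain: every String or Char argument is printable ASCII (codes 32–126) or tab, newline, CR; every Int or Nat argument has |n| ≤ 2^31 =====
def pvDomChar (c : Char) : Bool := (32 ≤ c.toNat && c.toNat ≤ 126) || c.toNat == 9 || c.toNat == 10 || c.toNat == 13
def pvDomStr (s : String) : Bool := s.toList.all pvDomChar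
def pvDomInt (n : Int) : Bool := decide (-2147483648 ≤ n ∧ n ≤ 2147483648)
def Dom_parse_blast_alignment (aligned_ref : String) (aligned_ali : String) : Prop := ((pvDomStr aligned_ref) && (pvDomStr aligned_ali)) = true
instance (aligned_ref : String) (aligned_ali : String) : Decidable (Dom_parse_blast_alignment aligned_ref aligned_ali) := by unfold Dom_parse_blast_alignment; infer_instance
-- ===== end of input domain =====

-- B replaces A's fused while-loop (running gap counter, last-element mutation) by an
-- index-arithmetic scheme: it collects the non-gap positions once, gets insert_counts
-- as differences of consecutive boundary indices and delete_labels by lookups there.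

-- ===== PORT A =====
-- insert_counts[-1] += 1 : increment the last element (insert_counts is never empty)
def pvIncLast : List Int → List Int
  | [] => []
  | [x] => [x + 1]
  | x :: xs => x :: pvIncLast xs

-- the while loop of A, recursing on the unread suffix of aligned_ali; ptr = ali_ptr.
-- aligned_ref[ali_ptr] via pyGet?: the `none` (IndexError) branch is excluded by Pre_.
def pvLoopA (ref : List Char) : List Char → Nat → List Int → List Int → List Int × List Int
  | [], _, ic, dl => (ic, dl)
  | c :: rest, ptr, ic, dl =>
    if c = '-' then
      pvLoopA ref rest (ptr + 1) (pvIncLast ic) dl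
    else
      match PySem.List.pyGet? ref (ptr : Int) with
      | none => (ic, dl)  -- IndexError; unreachable under Pre_
      | some rc =>
        pvLoopA ref rest (ptr + 1) (ic ++ [0]) (dl ++ [if rc = '-' then (1 : Int) else 0])

def parse_blast_alignment (aligned_ref : String) (aligned_ali : String) : List Int × List Int :=
  pvLoopA aligned_ref.toList aligned_ali.toList 0 [0] [1]

-- ===== PORT B =====
def parse_blast_alignment_alt (aligned_ref : String) (aligned_ali : String) : List Int × List Int :=
  let pos : List Int :=
    (PySem.List.enumerate aligned_ali.toList).filterMap
      (fun p => if p.2 = '-' then none else some p.1)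
  let bounds : List Int := -1 :: (pos ++ [(aligned_ali.toList.length : Int)])
  -- zip(bounds, bounds[1:]) : bounds[1:] ported as drop 1 (nonnegative slice)
  let insert_counts : List Int :=
    (bounds.zip (bounds.drop 1)).map (fun p => p.2 - p.1 - 1)
  let delete_labels : List Int :=
    1 :: pos.map (fun i =>
      match PySem.List.pyGet? aligned_ref.toList i with
      | some rc => if rc = '-' then (1 : Int) else 0
      | none => 0)  -- IndexError; unreachable under Pre_
  (insert_counts, delete_labels)

-- ===== PRECONDITION & SPEC =====
-- Pre_ excludes exactly the inputs where A raises IndexError: a non-gap position of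
-- aligned_ali at an index beyond the end of aligned_ref (B raises there too).
def Pre_parse_blast_alignment (aligned_ref : String) (aligned_ali : String) : Prop :=
  ∀ i : Nat, i < aligned_ali.toList.length → aligned_ali.toList[i]! ≠ '-' →
    i < aligned_ref.toList.length
instance (aligned_ref : String) (aligned_ali : String) : Decidable (Pre_parse_blast_alignment aligned_ref aligned_ali) := by unfold Pre_parse_blast_alignment; infer_instance

def pvWitness_parse_blast_alignment : String × String := ("A-C", "-AC")

def Spec_parse_blast_alignment (aligned_ref : String) (aligned_ali : String) (out : List Int × List Int) : Prop := out = parse_blast_alignment_alt aligned_ref aligned_ali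
instance (aligned_ref : String) (aligned_ali : String) (out : List Int × List Int) : Decidable (Spec_parse_blast_alignment aligned_ref aligned_ali out) := by unfold Spec_parse_blast_alignment; infer_instance

-- ===== CLAIM (what is proved, stated in full; the proofs are below) =====
def Claim_equal_parse_blast_alignment : Prop := ∀ (aligned_ref : String) (aligned_ali : String), Dom_parse_blast_alignment aligned_ref aligned_ali → Pre_parse_blast_alignment aligned_ref aligned_ali → Spec_parse_blast_alignment aligned_ref aligned_ali (parse_blast_alignment aligned_ref aligned_ali)

-- ===== LEMMAS AND PROOFS =====

theorem pvIncLast_append_singleton (xs : List Int) (g : Int) :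
    pvIncLast (xs ++ [g]) = xs ++ [g + 1] := by
  induction xs with
  | nil => rfl
  | cons x xs ih =>
    cases xs with
    | nil => simp [pvIncLast]
    | cons y ys => simpa [pvIncLast] using ih

-- gap run-lengths of ali, as A accumulates them (proof-side characterisation)
def pvGapRuns : List Char → Int → List Int
  | [], gap => [gap]
  | c :: rest, gap =>
    if c = '-' then pvGapRuns rest (gap + 1) else gap :: pvGapRuns rest 0

-- delete labels emitted from start index i on (proof-side characterisation)
def pvDelFrom (ref : List Char) : List Char → Nat → List Int
  | [], _ => []
  | c :: rest, i =>
    if c = '-' then pvDelFrom ref rest (i + 1)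
    else (match PySem.List.pyGet? ref (i : Int) with
          | some rc => if rc = '-' then (1 : Int) else 0
          | none => 0) :: pvDelFrom ref rest (i + 1)

-- B's pos list, from start index s
def pvPos (ali : List Char) (s : Int) : List Int :=
  (PySem.List.enumerate ali s).filterMap (fun p => if p.2 = '-' then none else some p.1)

theorem pvPos_map_eq_pvDelFrom (ref ali : List Char) (s : Nat) :
    (pvPos ali (s : Int)).map (fun i =>
      match PySem.List.pyGet? ref i with
      | some rc => if rc = '-' then (1 : Int) else 0
      | none => 0) = pvDelFrom ref ali s := by
  induction ali generalizing s with
  | nil => rfl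
  | cons c rest ih =>
    unfold pvPos
    rw [PySem.List.enumerate_cons]
    by_cases hc : c = '-' <;>
      simp [hc, pvDelFrom, ← ih (s + 1), pvPos]

theorem pvZip_eq_pvGapRuns (ali : List Char) :
    ∀ (s prev : Int),
      (((prev :: (pvPos ali s ++ [s + (ali.length : Int)])).zip
        (pvPos ali s ++ [s + (ali.length : Int)])).map (fun p => p.2 - p.1 - 1)) =
      pvGapRuns ali (s - prev - 1) := by
  induction ali with
  | nil => intro s prev; simp [pvPos, PySem.List.enumerate_nil, pvGapRuns]
  | cons c rest ih =>
    intro s prev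
    have hlen : ((c :: rest).length : Int) = (rest.length : Int) + 1 := by
      push_cast [List.length_cons]; ring
    by_cases hc : c = '-'
    · have hpos : pvPos (c :: rest) s = pvPos rest (s + 1) := by
        unfold pvPos; rw [PySem.List.enumerate_cons]; simp [hc]
      rw [hpos]
      have := ih (s + 1) prev
      have harith : s + ((c :: rest).length : Int) = (s + 1) + (rest.length : Int) := by
        rw [hlen]; ring
      rw [harith, this]
      have : (s + 1) - prev - 1 = (s - prev - 1) + 1 := by ring
      simp [pvGapRuns, hc, this]
    · have hpos : pvPos (c :: rest) s = s :: pvPos rest (s + 1) := by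
        unfold pvPos; rw [PySem.List.enumerate_cons]; simp [hc]
      rw [hpos]
      have harith : s + ((c :: rest).length : Int) = (s + 1) + (rest.length : Int) := by
        rw [hlen]; ring
      simp only [List.cons_append, List.zip_cons_cons, List.map_cons, harith]
      rw [ih (s + 1) s]
      simp [pvGapRuns, hc]

-- the main invariant of A's loop
theorem pvLoopA_eq (ref : List Char) (ali : List Char) :
    ∀ (ptr : Nat) (ic0 dl : List Int) (g : Int),
      (∀ j : Nat, j < ali.length → ali[j]! ≠ '-' → ptr + j < ref.length) →
      pvLoopA ref ali ptr (ic0 ++ [g]) dl =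
        (ic0 ++ pvGapRuns ali g, dl ++ pvDelFrom ref ali ptr) := by
  induction ali with
  | nil => intro ptr ic0 dl g _; simp [pvLoopA, pvGapRuns, pvDelFrom]
  | cons c rest ih =>
    intro ptr ic0 dl g hgood
    by_cases hc : c = '-'
    · rw [pvLoopA, if_pos hc, pvIncLast_append_singleton,
        ih (ptr + 1) ic0 dl (g + 1) (fun j hj hne => by
          have := hgood (j + 1) (by simpa using Nat.succ_lt_succ hj) (by simpa using hne)
          omega)]
      simp [pvGapRuns, pvDelFrom, hc]
    · have hlt : ptr < ref.length := by
        have := hgood 0 (by simp) (by simpa using hc); simpa using this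
      have hget : PySem.List.pyGet? ref (ptr : Int) = some ref[ptr] :=
        PySem.List.pyGet?_ofNat ref ptr hlt
      rw [pvLoopA, if_neg hc, hget]
      dsimp only
      rw [ih (ptr + 1) (ic0 ++ [g]) _ 0 (fun j hj hne => by
          have := hgood (j + 1) (by simpa using Nat.succ_lt_succ hj) (by simpa using hne)
          omega)]
      simp [pvGapRuns, pvDelFrom, hc, hget]

-- ===== VERDICT (by name: the statement is the Claim_ definition above) =====
theorem parse_blast_alignment_spec : Claim_equal_parse_blast_alignment := by
  intro ref ali _ hpre
  unfold Spec_parse_blast_alignment parse_blast_alignment parse_blast_alignment_alt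
  have hA := pvLoopA_eq ref.toList ali.toList 0 [] [1] 0
    (fun j hj hne => by simpa using hpre j hj hne)
  have hins := pvZip_eq_pvGapRuns ali.toList 0 (-1)
  have hdel := pvPos_map_eq_pvDelFrom ref.toList ali.toList 0
  simp only [Nat.cast_zero] at hdel
  simp only [zero_add] at hins
  simp only [List.nil_append] at hA
  rw [hA]
  have : ((0 : Int) - (-1) - 1) = 0 := by ring
  rw [this] at hins
  simp only [pvPos] at hins hdel
  simp only [List.drop_one, List.tail_cons]
  rw [hins, hdel]
  simp
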